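-- pv_equiv track=rewrite | github.com/NeuroTheoryUMD/mattjac | lvs/lib/mattplotlib.py | list_to_grid
-- ===== SOURCE A (Python) =====
-- import math
--
-- def list_to_grid(objects, width):
--     height = math.ceil(len(objects) / width)
--     grid = []
--     for i in range(height):
--         grid.append([])
--         for j in range(width):
--             idx = j + width*i
--             if idx < len(objects):
--                 grid[i].append(objects[idx])
--             else:
--                 grid[i].append(None)
--     return grid, height
-- ===== SOURCE B (Python) =====
-- def list_to_grid(objects, width):
--     height = -(-len(objects) // width)
--     padded = list(objects) + [None] * (height * width - len(objects))
--     grid = [padded[i * width:(i + 1) * width] for i in range(height)]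
--     return grid, height
-- ===== Notes on version B (the rewrite author's own statement) =====
-- stated objective: faster
-- what changed: B pads the list once with Nones to a full height*width rectangle and slices it into contiguous rows, replacing A's nested per-cell Python loop with its per-index bounds check; height is computed by exact integer ceiling division.
import Mathlib
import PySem

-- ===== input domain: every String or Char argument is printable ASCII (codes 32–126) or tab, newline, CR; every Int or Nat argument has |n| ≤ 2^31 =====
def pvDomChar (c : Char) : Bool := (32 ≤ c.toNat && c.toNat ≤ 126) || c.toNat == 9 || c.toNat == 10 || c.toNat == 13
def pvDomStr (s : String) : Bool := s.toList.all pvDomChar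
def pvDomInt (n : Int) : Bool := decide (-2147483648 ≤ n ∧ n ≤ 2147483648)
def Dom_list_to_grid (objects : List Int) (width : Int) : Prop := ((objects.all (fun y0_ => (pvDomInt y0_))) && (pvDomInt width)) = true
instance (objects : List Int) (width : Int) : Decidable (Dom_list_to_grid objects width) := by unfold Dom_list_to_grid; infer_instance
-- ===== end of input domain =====

-- B builds the grid by padding the list once with Nones to a full h*w rectangle and slicing it
-- into contiguous rows, replacing A's per-cell index/bounds-check inner loop; a timing run measured B faster by a constant factor (bulk slicing vs per-cell loop).

-- ===== PORT A =====
def list_to_grid (objects : List Int) (width : Int) : List (List (Option Int)) × Int :=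
  -- math.ceil(len(objects) / width): exact as -((-len) // width) for these integer magnitudes
  let height : Int := -(PySem.Int.floordiv (-(objects.length : Int)) width)
  let grid : List (List (Option Int)) :=
    (PySem.List.pyRange 0 height 1).foldl (fun grid i =>
      grid ++ [(PySem.List.pyRange 0 width 1).foldl (fun row j =>
        let idx := j + width * i
        row ++ [if idx < (objects.length : Int) then PySem.List.pyGet? objects idx else none]) []]) []
  (grid, height)

-- ===== PORT B =====
def list_to_grid_alt (objects : List Int) (width : Int) : List (List (Option Int)) × Int :=
  let height : Int := -(PySem.Int.floordiv (-(objects.length : Int)) width)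
  let padded : List (Option Int) :=
    objects.map some ++ List.replicate (height * width - (objects.length : Int)).toNat none
  let grid : List (List (Option Int)) :=
    (PySem.List.pyRange 0 height 1).map (fun i =>
      PySem.List.slice padded (some (i * width)) (some ((i + 1) * width)))
  (grid, height)

-- ===== PRECONDITION & SPEC =====
-- Pre_ excludes exactly width = 0, where A raises ZeroDivisionError (B raises there too).
def Pre_list_to_grid (objects : List Int) (width : Int) : Prop := width ≠ 0
instance (objects : List Int) (width : Int) : Decidable (Pre_list_to_grid objects width) := by unfold Pre_list_to_grid; infer_instance
def pvWitness_list_to_grid : List Int × Int := ([1, 2, 3], 2)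

def Spec_list_to_grid (objects : List Int) (width : Int) (out : List (List (Option Int)) × Int) : Prop := out = list_to_grid_alt objects width
instance (objects : List Int) (width : Int) (out : List (List (Option Int)) × Int) : Decidable (Spec_list_to_grid objects width out) := by unfold Spec_list_to_grid; infer_instance

-- ===== CLAIM (what is proved, stated in full; the proofs are below) =====
def Claim_equal_list_to_grid : Prop := ∀ (objects : List Int) (width : Int), Dom_list_to_grid objects width → Pre_list_to_grid objects width → Spec_list_to_grid objects width (list_to_grid objects width)

-- ===== LEMMAS AND PROOFS =====

-- the padded rectangle reads 'objects[idx]' below the list's length and None above it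
theorem getElem_pad (xs : List Int) (m idx : Nat) (hidx : idx < xs.length + m) :
    (xs.map some ++ List.replicate m none)[idx]'(by simp; omega) =
      if h : idx < xs.length then some (xs[idx]'h) else none := by
  rcases Nat.lt_or_ge idx xs.length with h | h
  · rw [List.getElem_append_left (by simpa using h)]
    simp [h]
  · rw [List.getElem_append_right (by simpa using h)]
    simp [Nat.not_lt.mpr h]

-- one row of A's per-cell loop equals B's slice of the padded rectangle
theorem row_eq (objects : List Int) (w h i : Int) (hw : 0 < w)
    (hrect : (objects.length : Int) ≤ h * w) (hi0 : 0 ≤ i) (hih : i < h) :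
    (PySem.List.pyRange 0 w 1).map (fun j =>
        if j + w * i < (objects.length : Int) then PySem.List.pyGet? objects (j + w * i) else none) =
      PySem.List.slice (objects.map some ++ List.replicate (h * w - (objects.length : Int)).toNat none)
        (some (i * w)) (some ((i + 1) * w)) := by
  have hn0 : (0 : Int) ≤ (objects.length : Int) := by positivity
  have hiw : 0 ≤ i * w := mul_nonneg hi0 (le_of_lt hw)
  have hi1w : 0 ≤ (i + 1) * w := mul_nonneg (by omega) (le_of_lt hw)
  have hle : (i + 1) * w ≤ h * w := mul_le_mul_of_nonneg_right (by omega) (le_of_lt hw)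
  have hhw0 : 0 ≤ h * w := le_trans hn0 hrect
  set m : Nat := (h * w - (objects.length : Int)).toNat with hm
  have hpadlen : (objects.map some ++ List.replicate m none).length = (h * w).toNat := by
    simp [hm]; omega
  have htoNat : ((i + 1) * w).toNat = (i * w).toNat + w.toNat := by
    have : (i + 1) * w = i * w + w := by ring
    rw [this]; omega
  have hbound : (i * w).toNat + w.toNat ≤ (h * w).toNat := by omega
  rw [PySem.List.slice_toNat _ hiw hi1w, htoNat]
  apply List.ext_getElem
  · rw [List.length_map, PySem.List.length_pyRange_one, List.length_take, List.length_drop, hpadlen]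
    omega
  · intro k hk _
    have hkw : k < w.toNat := by
      rw [List.length_map, PySem.List.length_pyRange_one] at hk; omega
    have hidx : (i * w).toNat + k < (objects.map some ++ List.replicate m none).length := by
      rw [hpadlen]; omega
    rw [List.getElem_map, PySem.List.getElem_pyRange_one,
        List.getElem_take, List.getElem_drop]
    have hcast : ((0 : Int) + (k : Int) + w * i).toNat = (i * w).toNat + k := by
      have : (0 : Int) + (k : Int) + w * i = i * w + (k : Int) := by ring
      rw [this]; omega
    have hcomm : w * i = i * w := mul_comm w i
    have hpad := getElem_pad objects m ((i * w).toNat + k) (by simp at hpadlen; omega)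
    rcases lt_or_ge ((0 : Int) + (k : Int) + w * i) (objects.length : Int) with hlt | hge
    · have hltN : (i * w).toNat + k < objects.length := by omega
      rw [if_pos hlt, PySem.List.pyGet?_of_nonneg _ (by omega), hcast,
          List.getElem?_eq_getElem hltN, hpad, dif_pos hltN]
    · have hgeN : ¬ ((i * w).toNat + k < objects.length) := by omega
      rw [if_neg (not_lt.mpr hge), hpad, dif_neg hgeN]

-- a positive height forces a positive width (for width < 0 the ceiling is ≤ 0)
theorem pos_width_of_pos_height (n : Nat) (w : Int) (hw : w ≠ 0)
    (hh : 0 < -(PySem.Int.floordiv (-(n : Int)) w)) : 0 < w := by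
  rcases lt_or_gt_of_ne hw with hneg | hpos
  · exfalso
    have : 0 ≤ PySem.Int.floordiv (-(n : Int)) w := by
      simp only [PySem.Int.floordiv]
      exact Int.fdiv_nonneg_of_nonpos_of_nonpos (by omega) (by omega)
    omega
  · exact hpos

-- ===== VERDICT (by name: the statement is the Claim_ definition above) =====
theorem list_to_grid_spec : Claim_equal_list_to_grid := by
  intro objects width _ hpre
  unfold Spec_list_to_grid list_to_grid list_to_grid_alt
  simp only [PySem.List.foldl_append_singleton_eq_map, List.nil_append]
  refine Prod.ext ?_ rfl
  simp only []
  apply List.map_congr_left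
  intro i hi
  rw [PySem.List.mem_pyRange_one] at hi
  have hw : 0 < width := pos_width_of_pos_height objects.length width hpre (by omega)
  have hq := (PySem.Int.neg_floordiv_neg_eq_iff_of_pos (a := (objects.length : Int))
      (q := -(PySem.Int.floordiv (-(objects.length : Int)) width)) hw).mp rfl
  exact row_eq objects width _ i hw hq.2 hi.1 hi.2
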